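-- pv_equiv track=rewrite | github.com/LittleDevMars/FastMovieMaker | src/services/video_exporter.py | _flags_for_encoder
-- ===== SOURCE A (Python) =====
-- def _flags_for_encoder(
--     encoder: str,
--     codec: str,
--     preset: str,
--     crf: int,
--     output_suffix: str,
-- ) -> list[str]:
--     """Resolve encoder flags with export-specific quality values."""
--     if output_suffix == ".webm":
--         return ["-crf", str(crf), "-b:v", "0"]
--
--     if "videotoolbox" in encoder:
--         quality = int(max(0, min(100, 100 - (crf * 1.5))))
--         flags = ["-q:v", str(quality), "-realtime", "0"]
--     elif "nvenc" in encoder: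
--         flags = ["-preset", "p4", "-cq", str(crf)]
--     elif "qsv" in encoder:
--         flags = ["-global_quality", str(crf), "-look_ahead", "1"]
--     elif "amf" in encoder:
--         flags = ["-rc", "cqp", "-qp_i", str(crf), "-qp_p", str(crf), "-qp_b", str(crf)]
--     elif "vaapi" in encoder:
--         flags = ["-rc_mode", "CQP", "-global_quality", str(crf)]
--     elif encoder in ("libx264", "libx265"):
--         flags = ["-preset", preset, "-crf", str(crf)]
--     elif encoder == "libvpx-vp9":
--         flags = ["-crf", str(crf), "-b:v", "0"]
--     else:
--         # Unknown encoders default to software profile.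
--         fallback = "libx265" if codec == "hevc" else "libx264"
--         if encoder != fallback:
--             return _flags_for_encoder(fallback, codec, preset, crf, output_suffix)
--         flags = ["-preset", preset, "-crf", str(crf)]
--
--     if "-pix_fmt" not in flags and encoder != "libvpx-vp9":
--         flags.extend(["-pix_fmt", "yuv420p"])
--     return flags
-- ===== SOURCE B (Python) =====
-- def _flags_for_encoder(
--     encoder: str,
--     codec: str,
--     preset: str,
--     crf: int,
--     output_suffix: str,
-- ) -> list[str]:
--     """Resolve encoder flags via an ordered predicate->flags dispatch table."""
--     if output_suffix == ".webm":
--         return ["-crf", str(crf), "-b:v", "0"]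
--     # Unknown encoders always resolve to the software profile, so the
--     # fallback recursion is inlined as the table's default.
--     software = ["-preset", preset, "-crf", str(crf)]
--     rules = [
--         (lambda e: "videotoolbox" in e,
--          lambda: ["-q:v", str(max(0, min(100, (200 - 3 * crf) // 2))), "-realtime", "0"]),
--         (lambda e: "nvenc" in e, lambda: ["-preset", "p4", "-cq", str(crf)]),
--         (lambda e: "qsv" in e, lambda: ["-global_quality", str(crf), "-look_ahead", "1"]),
--         (lambda e: "amf" in e,
--          lambda: ["-rc", "cqp", "-qp_i", str(crf), "-qp_p", str(crf), "-qp_b", str(crf)]),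
--         (lambda e: "vaapi" in e, lambda: ["-rc_mode", "CQP", "-global_quality", str(crf)]),
--         (lambda e: e in ("libx264", "libx265"), lambda: software),
--         (lambda e: e == "libvpx-vp9", lambda: ["-crf", str(crf), "-b:v", "0"]),
--     ]
--     flags = next((mk() for p, mk in rules if p(encoder)), software)
--     if encoder == "libvpx-vp9" or "-pix_fmt" in flags:
--         return flags
--     return flags + ["-pix_fmt", "yuv420p"]
-- ===== Notes on version B (the rewrite author's own statement) =====
-- stated objective: idiomatic
-- what changed: Replaces the if/elif chain and the self-recursive unknown-encoder fallback with an ordered (predicate, flag-producer) dispatch table whose default is the inlined software profile, the float videotoolbox quality with exact integer arithmetic, and the in-place extend with conditional list concatenation.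
import Mathlib
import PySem

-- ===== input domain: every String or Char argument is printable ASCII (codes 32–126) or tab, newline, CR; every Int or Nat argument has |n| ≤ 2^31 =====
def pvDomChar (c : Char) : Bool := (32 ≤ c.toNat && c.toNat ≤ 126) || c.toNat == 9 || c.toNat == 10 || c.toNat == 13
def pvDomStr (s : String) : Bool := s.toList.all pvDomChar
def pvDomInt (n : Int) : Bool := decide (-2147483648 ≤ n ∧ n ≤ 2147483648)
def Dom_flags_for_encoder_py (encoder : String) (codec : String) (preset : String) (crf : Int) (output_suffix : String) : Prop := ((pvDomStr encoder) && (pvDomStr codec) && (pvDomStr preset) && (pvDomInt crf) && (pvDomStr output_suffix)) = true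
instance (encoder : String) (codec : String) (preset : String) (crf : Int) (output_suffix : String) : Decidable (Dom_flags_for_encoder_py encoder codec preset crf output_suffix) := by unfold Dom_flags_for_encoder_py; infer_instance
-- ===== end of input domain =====

-- B replaces A's if/elif chain and fallback recursion by an ordered (predicate, flag-producer)
-- dispatch table with the software profile inlined as default (idiomatic; same cost).


-- ===== PORT A =====
-- A's float expression `int(max(0, min(100, 100 - crf*1.5)))` is ported exactly:
-- for |crf| ≤ 2^31 the float computation is exact (half-integers below 2^53) and
-- int() of the clamped nonnegative value is floor, i.e. floordiv (200 - crf*3) 2.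
def flags_for_encoder_py (encoder : String) (codec : String) (preset : String) (crf : Int) (output_suffix : String) : List String :=
  if output_suffix = ".webm" then ["-crf", PySem.Int.toStr crf, "-b:v", "0"]
  else
    -- `post` is the trailing `if "-pix_fmt" not in flags and encoder != "libvpx-vp9"` step
    let post : List String → List String := fun flags =>
      if "-pix_fmt" ∉ flags ∧ encoder ≠ "libvpx-vp9" then flags ++ ["-pix_fmt", "yuv420p"]
      else flags
    if PySem.Str.isIn "videotoolbox" encoder then
      let quality := max 0 (min 100 (PySem.Int.floordiv (200 - crf * 3) 2))
      post ["-q:v", PySem.Int.toStr quality, "-realtime", "0"]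
    else if PySem.Str.isIn "nvenc" encoder then
      post ["-preset", "p4", "-cq", PySem.Int.toStr crf]
    else if PySem.Str.isIn "qsv" encoder then
      post ["-global_quality", PySem.Int.toStr crf, "-look_ahead", "1"]
    else if PySem.Str.isIn "amf" encoder then
      post ["-rc", "cqp", "-qp_i", PySem.Int.toStr crf, "-qp_p", PySem.Int.toStr crf, "-qp_b", PySem.Int.toStr crf]
    else if PySem.Str.isIn "vaapi" encoder then
      post ["-rc_mode", "CQP", "-global_quality", PySem.Int.toStr crf]
    else if encoder = "libx264" ∨ encoder = "libx265" then
      post ["-preset", preset, "-crf", PySem.Int.toStr crf]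
    else if encoder = "libvpx-vp9" then
      post ["-crf", PySem.Int.toStr crf, "-b:v", "0"]
    else
      if encoder ≠ (if codec = "hevc" then "libx265" else "libx264") then
        flags_for_encoder_py (if codec = "hevc" then "libx265" else "libx264") codec preset crf output_suffix
      else post ["-preset", preset, "-crf", PySem.Int.toStr crf]
termination_by (if encoder = "libx264" ∨ encoder = "libx265" then 0 else 1 : Nat)
decreasing_by
  split <;> split <;> simp_all

-- ===== PORT B =====
def flags_for_encoder_py_alt (encoder : String) (codec : String) (preset : String) (crf : Int) (output_suffix : String) : List String :=
  if output_suffix = ".webm" then ["-crf", PySem.Int.toStr crf, "-b:v", "0"]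
  else
    let software := ["-preset", preset, "-crf", PySem.Int.toStr crf]
    let rules : List ((String → Bool) × (Unit → List String)) :=
      [ (fun e => PySem.Str.isIn "videotoolbox" e,
         fun _ => ["-q:v", PySem.Int.toStr (max 0 (min 100 (PySem.Int.floordiv (200 - 3 * crf) 2))), "-realtime", "0"]),
        (fun e => PySem.Str.isIn "nvenc" e,
         fun _ => ["-preset", "p4", "-cq", PySem.Int.toStr crf]),
        (fun e => PySem.Str.isIn "qsv" e,
         fun _ => ["-global_quality", PySem.Int.toStr crf, "-look_ahead", "1"]),
        (fun e => PySem.Str.isIn "amf" e,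
         fun _ => ["-rc", "cqp", "-qp_i", PySem.Int.toStr crf, "-qp_p", PySem.Int.toStr crf, "-qp_b", PySem.Int.toStr crf]),
        (fun e => PySem.Str.isIn "vaapi" e,
         fun _ => ["-rc_mode", "CQP", "-global_quality", PySem.Int.toStr crf]),
        (fun e => e == "libx264" || e == "libx265", fun _ => software),
        (fun e => e == "libvpx-vp9", fun _ => ["-crf", PySem.Int.toStr crf, "-b:v", "0"]) ]
    let flags := match rules.find? (fun r => r.1 encoder) with
      | some r => r.2 ()
      | none => software
    if encoder == "libvpx-vp9" || "-pix_fmt" ∈ flags then flags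
    else flags ++ ["-pix_fmt", "yuv420p"]

-- ===== PRECONDITION & SPEC =====
def Spec_flags_for_encoder_py (encoder : String) (codec : String) (preset : String) (crf : Int) (output_suffix : String) (out : List String) : Prop := out = flags_for_encoder_py_alt encoder codec preset crf output_suffix
instance (encoder : String) (codec : String) (preset : String) (crf : Int) (output_suffix : String) (out : List String) : Decidable (Spec_flags_for_encoder_py encoder codec preset crf output_suffix out) := by unfold Spec_flags_for_encoder_py; infer_instance

-- ===== CLAIM (what is proved, stated in full; the proofs are below) =====
def Claim_equal_flags_for_encoder_py : Prop := ∀ (encoder : String) (codec : String) (preset : String) (crf : Int) (output_suffix : String), Dom_flags_for_encoder_py encoder codec preset crf output_suffix → Spec_flags_for_encoder_py encoder codec preset crf output_suffix (flags_for_encoder_py encoder codec preset crf output_suffix)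

-- ===== LEMMAS AND PROOFS =====

-- the shared trailing pix_fmt step, in A's prop-if form vs B's bool-if form
theorem pv_post_eq (enc : String) (L X : List String) :
    (if "-pix_fmt" ∉ L ∧ enc ≠ "libvpx-vp9" then L ++ X else L)
      = (if (enc == "libvpx-vp9" || decide ("-pix_fmt" ∈ L)) = true then L else L ++ X) := by
  by_cases hm : "-pix_fmt" ∈ L <;> by_cases hv : enc = "libvpx-vp9" <;> simp [hm, hv]


-- ===== VERDICT (by name: the statement is the Claim_ definition above) =====
theorem flags_for_encoder_py_spec : Claim_equal_flags_for_encoder_py := by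
  intro encoder codec preset crf output_suffix _
  unfold Spec_flags_for_encoder_py
  by_cases hs : output_suffix = ".webm"
  · simp [flags_for_encoder_py, flags_for_encoder_py_alt, hs]
  · have hmul : (200 : Int) - crf * 3 = 200 - 3 * crf := by ring
    rw [flags_for_encoder_py, flags_for_encoder_py_alt]
    by_cases h1 : PySem.Str.isIn "videotoolbox" encoder = true
    · simp only [List.find?, hs, h1, if_true, if_false]
      rw [hmul]
      exact pv_post_eq encoder _ _
    · by_cases h2 : PySem.Str.isIn "nvenc" encoder = true
      · simp only [List.find?, hs, h1, h2, if_true, if_false]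
        exact pv_post_eq encoder _ _
      · by_cases h3 : PySem.Str.isIn "qsv" encoder = true
        · simp only [List.find?, hs, h1, h2, h3, if_true, if_false]
          exact pv_post_eq encoder _ _
        · by_cases h4 : PySem.Str.isIn "amf" encoder = true
          · simp only [List.find?, hs, h1, h2, h3, h4, if_true, if_false]
            exact pv_post_eq encoder _ _
          · by_cases h5 : PySem.Str.isIn "vaapi" encoder = true
            · simp only [List.find?, hs, h1, h2, h3, h4, h5, if_true, if_false]
              exact pv_post_eq encoder _ _
            · by_cases h6 : encoder = "libx264" ∨ encoder = "libx265"
              · have hb6 : (encoder == "libx264" || encoder == "libx265") = true := by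
                  rcases h6 with h | h <;> simp [h]
                simp only [List.find?, hs, h1, h2, h3, h4, h5, h6, hb6, if_true, if_false]
                exact pv_post_eq encoder _ _
              · have hb6 : (encoder == "libx264" || encoder == "libx265") = false := by
                  simp only [not_or] at h6; simp [h6.1, h6.2]
                by_cases h7 : encoder = "libvpx-vp9"
                · subst h7
                  simp [List.find?, hs, hb6,
                    show PySem.Chars.isIn ['v','i','d','e','o','t','o','o','l','b','o','x'] ['l','i','b','v','p','x','-','v','p','9'] = false from by decide,
                    show PySem.Chars.isIn ['n','v','e','n','c'] ['l','i','b','v','p','x','-','v','p','9'] = false from by decide,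
                    show PySem.Chars.isIn ['q','s','v'] ['l','i','b','v','p','x','-','v','p','9'] = false from by decide,
                    show PySem.Chars.isIn ['a','m','f'] ['l','i','b','v','p','x','-','v','p','9'] = false from by decide,
                    show PySem.Chars.isIn ['v','a','a','p','i'] ['l','i','b','v','p','x','-','v','p','9'] = false from by decide]
                · have hb7 : (encoder == "libvpx-vp9") = false := by simp [h7]
                  simp only [not_or] at h6
                  have hne : encoder ≠ (if codec = "hevc" then "libx265" else "libx264") := by
                    by_cases hc : codec = "hevc" <;> simp [hc, h6.1, h6.2]
                  simp only [List.find?, hs, h1, h2, h3, h4, h5, hb6, h7, hb7, h6.1, h6.2,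
                    hne, if_true, if_false, Bool.false_or, or_false, false_or]
                  rw [flags_for_encoder_py]
                  by_cases hc : codec = "hevc"
                  · simp only [hc, if_true, if_false, hs,
                      show PySem.Str.isIn "videotoolbox" "libx265" = false from by decide,
                      show PySem.Str.isIn "nvenc" "libx265" = false from by decide,
                      show PySem.Str.isIn "qsv" "libx265" = false from by decide,
                      show PySem.Str.isIn "amf" "libx265" = false from by decide,
                      show PySem.Str.isIn "vaapi" "libx265" = false from by decide]
                    by_cases hm : ("-pix_fmt" : String) ∈ (["-preset", preset, "-crf", PySem.Int.toStr crf] : List String) <;>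
                      simp [hm, h7]
                  · simp only [hc, if_true, if_false, hs,
                      show PySem.Str.isIn "videotoolbox" "libx264" = false from by decide,
                      show PySem.Str.isIn "nvenc" "libx264" = false from by decide,
                      show PySem.Str.isIn "qsv" "libx264" = false from by decide,
                      show PySem.Str.isIn "amf" "libx264" = false from by decide,
                      show PySem.Str.isIn "vaapi" "libx264" = false from by decide]
                    by_cases hm : ("-pix_fmt" : String) ∈ (["-preset", preset, "-crf", PySem.Int.toStr crf] : List String) <;>
                      simp [hm, h7]
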